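-- pv_equiv track=rewrite | github.com/eric9816/parallelprog | thead/class_threads/anton_task.py | find_anton
-- ===== SOURCE A (Python) =====
-- def find_anton(line:  str) -> bool:
--     line = line.replace(' ', '')
--     line = line.strip()
--
--     name = 'anton'
--     result = []
--
--     for letter in line:
--         letter = letter.lower()
--         if letter in name:
--             result.append(letter)
--     result_str = ''.join(result)
--
--     if name in result_str:
--         return True
--
--     return False
-- ===== SOURCE B (Python) =====
-- def find_anton(line: str) -> bool:
--     # One-pass KMP-style automaton for 'anton' over the relevant letters;
--     # irrelevant characters are skipped, no intermediate string is built.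
--     state = 0
--     for ch in line:
--         c = ch.lower()
--         if c == 'a':
--             state = 1
--         elif c == 'n':
--             state = 2 if state == 1 else (5 if state == 4 else 0)
--         elif c == 't':
--             state = 3 if state == 2 else 0
--         elif c == 'o':
--             state = 4 if state == 3 else 0
--         if state == 5:
--             return True
--     return False
-- ===== Notes on version B (the rewrite author's own statement) =====
-- stated objective: alternative
-- what changed: A filters the relevant letters into an intermediate string and then runs a substring search for 'anton'; B makes a single pass over the original line driving a 6-state KMP-style automaton for 'anton', skipping irrelevant characters and returning as soon as the pattern completes, with no intermediate string.
import Mathlib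
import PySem

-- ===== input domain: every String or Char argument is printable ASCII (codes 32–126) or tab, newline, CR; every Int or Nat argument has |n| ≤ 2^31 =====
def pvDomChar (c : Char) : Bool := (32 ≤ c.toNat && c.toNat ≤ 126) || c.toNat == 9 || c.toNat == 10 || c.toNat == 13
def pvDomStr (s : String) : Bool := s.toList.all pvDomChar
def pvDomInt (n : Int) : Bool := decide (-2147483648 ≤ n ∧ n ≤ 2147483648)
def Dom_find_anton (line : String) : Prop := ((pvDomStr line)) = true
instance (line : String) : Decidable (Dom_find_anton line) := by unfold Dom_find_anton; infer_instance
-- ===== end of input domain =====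

-- B replaces A's build-a-filtered-string-then-substring-search with a single left-to-right
-- pass driving a 6-state KMP-style automaton for 'anton' (alternative decomposition).

-- ===== PORT A =====
def find_anton (line : String) : Bool :=
  let line1 := PySem.Str.replace line " " ""
  let line2 := PySem.Str.strip line1
  let name := "anton"
  let result : List Char := line2.toList.foldl
    (fun acc letter =>
      let l := PySem.Chars.lowerChar letter
      if PySem.Chars.isIn [l] name.toList then acc ++ [l] else acc) []
  let result_str := PySem.Chars.join [] (result.map fun c => [c])
  if PySem.Chars.isIn name.toList result_str then true else false

-- ===== PORT B =====
-- one automaton step; state 5 = 'anton' already found (Python B has returned True there)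
def antonStep (st : Nat) (ch : Char) : Nat :=
  if st = 5 then 5
  else
    let c := PySem.Chars.lowerChar ch
    if c = 'a' then 1
    else if c = 'n' then (if st = 1 then 2 else if st = 4 then 5 else 0)
    else if c = 't' then (if st = 2 then 3 else 0)
    else if c = 'o' then (if st = 3 then 4 else 0)
    else st

def find_anton_alt (line : String) : Bool :=
  decide (line.toList.foldl antonStep 0 = 5)

-- ===== PRECONDITION & SPEC =====
def Spec_find_anton (line : String) (out : Bool) : Prop := out = find_anton_alt line
instance (line : String) (out : Bool) : Decidable (Spec_find_anton line out) := by unfold Spec_find_anton; infer_instance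

-- ===== CLAIM (what is proved, stated in full; the proofs are below) =====
def Claim_equal_find_anton : Prop := ∀ (line : String), Dom_find_anton line → Spec_find_anton line (find_anton line)

-- ===== LEMMAS AND PROOFS =====

-- the pattern and the filter predicate of A's loop
def anton : List Char := ['a', 'n', 't', 'o', 'n']

def pA (c : Char) : Bool := PySem.Chars.isIn [PySem.Chars.lowerChar c] "anton".toList

-- generic list facts ---------------------------------------------------------

lemma snoc_suffix_snoc {u v : List Char} {a b : Char} :
    (u ++ [a]) <:+ (v ++ [b]) ↔ a = b ∧ u <:+ v := by
  constructor
  · rintro ⟨w, hw⟩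
    rw [← List.append_assoc] at hw
    obtain ⟨h1, h2⟩ := List.append_inj' hw rfl
    exact ⟨by simpa using h2, ⟨w, h1⟩⟩
  · rintro ⟨rfl, w, hw⟩
    exact ⟨w, by rw [← List.append_assoc, hw]⟩

lemma suffix_of_suffix_le {l₁ l₂ l₃ : List Char} (h1 : l₁ <:+ l₃) (h2 : l₂ <:+ l₃)
    (h : l₁.length ≤ l₂.length) : l₁ <:+ l₂ := by
  rcases List.suffix_or_suffix_of_suffix h1 h2 with h' | h'
  · exact h'
  · exact (List.IsSuffix.eq_of_length_le h' h) ▸ List.suffix_rfl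

lemma suffix_snoc_of_suffix {u v : List Char} (a : Char) (h : u <:+ v) :
    (u ++ [a]) <:+ (v ++ [a]) := by
  obtain ⟨w, hw⟩ := h
  exact ⟨w, by rw [← List.append_assoc, hw]⟩

-- A's preprocessing is invisible to the filter -------------------------------

lemma replace_go_spec (fuel : Nat) : ∀ (l acc : List Char), l.length ≤ fuel →
    PySem.Chars.replace.go [' '] [] fuel l acc
      = acc.reverse ++ l.filter (fun c => !(c == ' ')) := by
  induction fuel with
  | zero =>
    intro l acc hl
    have : l = [] := List.eq_nil_of_length_eq_zero (Nat.le_zero.mp hl)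
    subst this
    simp [PySem.Chars.replace.go]
  | succ n ih =>
    intro l acc hl
    cases l with
    | nil => simp [PySem.Chars.replace.go]
    | cons c t =>
      by_cases hc : c = ' '
      · subst hc
        have hpre : [' '].isPrefixOf (' ' :: t) = true := by simp [List.isPrefixOf]
        simp only [PySem.Chars.replace.go, hpre, if_pos, List.length_cons, List.length_nil,
          Nat.zero_add, List.drop_succ_cons, List.drop_zero, List.reverse_nil, List.nil_append]
        rw [ih t acc (by simpa using Nat.le_of_succ_le_succ hl)]
        simp
      · have hpre : [' '].isPrefixOf (c :: t) = false := by
          simp [List.isPrefixOf]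
          intro h; exact absurd h.symm hc
        simp only [PySem.Chars.replace.go, hpre, Bool.false_eq_true, if_false]
        rw [ih t (c :: acc) (by simpa using Nat.le_of_succ_le_succ hl)]
        simp [hc]

lemma replace_space (cs : List Char) :
    PySem.Chars.replace cs [' '] [] = cs.filter (fun c => !(c == ' ')) := by
  unfold PySem.Chars.replace
  rw [if_neg (by simp)]
  simpa using replace_go_spec cs.length cs [] le_rfl

lemma filter_dropWhile (q w : Char → Bool) (h : ∀ c, w c = true → q c = false) :
    ∀ l : List Char, (l.dropWhile w).filter q = l.filter q := by
  intro l
  induction l with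
  | nil => rfl
  | cons c t ih =>
    by_cases hw : w c = true
    · simp [hw, h c hw, ih]
    · simp [hw]

lemma filter_strip (q : Char → Bool) (h : ∀ c, PySem.Chars.isspace c = true → q c = false)
    (l : List Char) : (PySem.Chars.strip l).filter q = l.filter q := by
  unfold PySem.Chars.strip PySem.Chars.rstrip PySem.Chars.lstrip
  rw [List.filter_reverse, filter_dropWhile q _ h, List.filter_reverse, List.reverse_reverse,
    filter_dropWhile q _ h]

lemma isspace_pA_false (c : Char) (h : PySem.Chars.isspace c = true) : pA c = false := by
  have hn : c.toNat = 32 ∨ (9 ≤ c.toNat ∧ c.toNat ≤ 13) ∨ (28 ≤ c.toNat ∧ c.toNat ≤ 31)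
      ∨ c.toNat = 133 ∨ c.toNat = 160 ∨ c.toNat = 5760 ∨ (8192 ≤ c.toNat ∧ c.toNat ≤ 8202)
      ∨ c.toNat = 8232 ∨ c.toNat = 8233 ∨ c.toNat = 8239 ∨ c.toNat = 8287 ∨ c.toNat = 12288 := by
    simp only [PySem.Chars.isspace, Bool.or_eq_true, Bool.and_eq_true, decide_eq_true_eq] at h
    tauto
  have hup : PySem.Chars.isupper c = false := by
    by_contra hcon
    have hc' : PySem.Chars.isupper c = true := by simpa using hcon
    simp only [PySem.Chars.isupper, Bool.and_eq_true, decide_eq_true_eq, Char.le_def,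
      UInt32.le_iff_toNat_le] at hc'
    have hA : ('A' : Char).val.toNat = 65 := by decide
    have hZ : ('Z' : Char).val.toNat = 90 := by decide
    have hcv : c.val.toNat = c.toNat := rfl
    rw [hA, hZ, hcv] at hc'
    omega
  have hl : PySem.Chars.lowerChar c = c := by simp [PySem.Chars.lowerChar, hup]
  have hmem : c ≠ 'a' ∧ c ≠ 'n' ∧ c ≠ 't' ∧ c ≠ 'o' := by
    refine ⟨?_, ?_, ?_, ?_⟩ <;> (rintro rfl; exact absurd h (by decide))
  rw [pA, hl, (PySem.Chars.isIn_eq_false_iff _ _)]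
  intro hinf
  have hm := (List.singleton_infix_iff _ _).mp hinf
  have : "anton".toList = ['a','n','t','o','n'] := by decide
  rw [this] at hm
  simp only [List.mem_cons, List.not_mem_nil, or_false] at hm
  rcases hm with rfl | rfl | rfl | rfl | rfl
  · exact hmem.1 rfl
  · exact hmem.2.1 rfl
  · exact hmem.2.2.1 rfl
  · exact hmem.2.2.2 rfl
  · exact hmem.2.1 rfl

-- the automaton invariant ----------------------------------------------------

def AntonInv (ys : List Char) (s : Nat) : Prop :=
  (s = 5 ∧ anton <:+: ys) ∨
  (s ≤ 4 ∧ ¬ anton <:+: ys ∧ anton.take s <:+ ys ∧ ∀ k, k ≤ 4 → anton.take k <:+ ys → k ≤ s)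

-- the automaton's transition on an already-lowered letter, with the st = 5 guard removed
def antonDelta (st : Nat) (c : Char) : Nat :=
  if c = 'a' then 1
  else if c = 'n' then (if st = 1 then 2 else if st = 4 then 5 else 0)
  else if c = 't' then (if st = 2 then 3 else 0)
  else if c = 'o' then (if st = 3 then 4 else 0)
  else st

lemma antonStep_eq (s : Nat) (c : Char) (h : s ≠ 5) :
    antonStep s c = antonDelta s (PySem.Chars.lowerChar c) := by
  simp [antonStep, antonDelta, h]

lemma take_anton_succ : ∀ j, j < 5 → anton.take (j + 1) = anton.take j ++ [anton.getD j ' '] := by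
  decide

lemma inv_snoc (ys : List Char) (l : Char) (s s' : Nat)
    (hle : s ≤ 4) (hninf : ¬ anton <:+: ys) (hsuf : anton.take s <:+ ys)
    (hmax : ∀ k, k ≤ 4 → anton.take k <:+ ys → k ≤ s)
    (hle5 : s' ≤ 5)
    (h5 : s' = 5 → anton <:+ anton.take s ++ [l])
    (hns : s' ≤ 4 → ¬(l = 'n' ∧ s = 4))
    (hsuf' : s' ≤ 4 → anton.take s' <:+ anton.take s ++ [l])
    (hkey : ∀ j, j < 4 → anton.take j <:+ anton.take s →
      anton.getD j ' ' = l → j + 1 ≤ s') :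
    AntonInv (ys ++ [l]) s' := by
  by_cases h5' : s' = 5
  · left
    refine ⟨h5', ((h5 h5').trans (suffix_snoc_of_suffix l hsuf)).isInfix⟩
  · right
    have hle4 : s' ≤ 4 := by omega
    refine ⟨hle4, ?_, ?_, ?_⟩
    · intro hinf
      rcases List.infix_concat_iff.mp hinf with hsf | hif
      · have hanton : anton = anton.take 4 ++ ['n'] := by decide
        rw [hanton] at hsf
        obtain ⟨hnl, h4⟩ := snoc_suffix_snoc.mp hsf
        have : (4 : Nat) ≤ s := hmax 4 le_rfl h4
        exact hns hle4 ⟨hnl.symm, by omega⟩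
      · exact hninf hif
    · exact (hsuf' hle4).trans (suffix_snoc_of_suffix l hsuf)
    · intro k hk4 hk
      cases k with
      | zero => exact Nat.zero_le _
      | succ j =>
        rw [take_anton_succ j (by omega)] at hk
        obtain ⟨hjl, hjys⟩ := snoc_suffix_snoc.mp hk
        have hjs : j ≤ s := hmax j (by omega) hjys
        have hjts : anton.take j <:+ anton.take s :=
          suffix_of_suffix_le hjys hsuf (by simp [List.length_take, anton]; omega)
        exact hkey j (by omega) hjts hjl

-- the per-letter side conditions of inv_snoc, checked once for all states and letters
lemma delta_facts : ∀ s, s < 5 → ∀ l, l ∈ anton →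
    antonDelta s l ≤ 5 ∧
    (antonDelta s l = 5 → anton <:+ anton.take s ++ [l]) ∧
    (antonDelta s l ≤ 4 → ¬(l = 'n' ∧ s = 4)) ∧
    (antonDelta s l ≤ 4 → anton.take (antonDelta s l) <:+ anton.take s ++ [l]) ∧
    (∀ j, j < 4 → anton.take j <:+ anton.take s →
      anton.getD j ' ' = l → j + 1 ≤ antonDelta s l) := by
  intro s hs l hl
  interval_cases s <;> fin_cases hl <;>
    refine ⟨by decide, by decide, by decide, by decide, ?_⟩ <;>
    (intro j hj h1 h2; interval_cases j <;> first | omega | (revert h1 h2; decide))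

lemma pA_mem (c : Char) (hc : pA c = true) : PySem.Chars.lowerChar c ∈ anton := by
  rw [pA] at hc
  have h2 : PySem.Chars.lowerChar c ∈ "anton".toList :=
    (List.singleton_infix_iff _ _).mp ((PySem.Chars.isIn_iff_infix _ _).mp hc)
  have : "anton".toList = anton := by decide
  rwa [this] at h2

lemma step_skip (s : Nat) (c : Char) (h : pA c = false) : antonStep s c = s := by
  rw [pA, (PySem.Chars.isIn_eq_false_iff _ _)] at h
  have hl : PySem.Chars.lowerChar c ∉ anton := by
    intro hm
    have : "anton".toList = anton := by decide
    exact h ((List.singleton_infix_iff _ _).mpr (this ▸ hm))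
  simp only [anton, List.mem_cons, List.not_mem_nil, or_false, not_or] at hl
  obtain ⟨h1, h2, h3, h4, _⟩ := hl
  by_cases h5 : s = 5
  · simp [antonStep, h5]
  · simp [antonStep, h5, h1, h2, h3, h4]

lemma step_inv (s : Nat) (c : Char) (ys : List Char) (hc : pA c = true)
    (hI : AntonInv ys s) : AntonInv (ys ++ [PySem.Chars.lowerChar c]) (antonStep s c) := by
  rcases hI with ⟨h5, hinf⟩ | ⟨hle, hninf, hsuf, hmax⟩
  · left
    subst h5
    exact ⟨by simp [antonStep], hinf.trans (List.prefix_append ys _).isInfix⟩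
  · rw [antonStep_eq s c (by omega)]
    have hl := pA_mem c hc
    obtain ⟨f0, f1, f2, f3, f4⟩ := delta_facts s (by omega) (PySem.Chars.lowerChar c) hl
    exact inv_snoc ys (PySem.Chars.lowerChar c) s _ hle hninf hsuf hmax f0 f1 f2 f3 f4

lemma foldl_inv (cs : List Char) : ∀ (s : Nat) (ys : List Char), AntonInv ys s →
    AntonInv (ys ++ (cs.filter pA).map PySem.Chars.lowerChar) (cs.foldl antonStep s) := by
  induction cs with
  | nil => intro s ys h; simpa
  | cons c t ih =>
    intro s ys h
    by_cases hc : pA c = true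
    · have h' := step_inv s c ys hc h
      have := ih (antonStep s c) (ys ++ [PySem.Chars.lowerChar c]) h'
      simpa [hc, List.append_assoc] using this
    · rw [List.foldl_cons, step_skip s c (Bool.eq_false_iff.mpr hc)]
      have : (c :: t).filter pA = t.filter pA := by
        simp [Bool.eq_false_iff.mpr hc]
      rw [this]
      exact ih s ys h

lemma inv_init : AntonInv [] 0 := by
  right
  refine ⟨by omega, by simp [anton], by simp, ?_⟩
  intro k hk hsuf
  have := List.suffix_nil.mp hsuf
  have hlen := congrArg List.length this
  simp [List.length_take, anton] at hlen
  omega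

lemma run_eq_iff (cs : List Char) :
    (cs.foldl antonStep 0 = 5) ↔ anton <:+: (cs.filter pA).map PySem.Chars.lowerChar := by
  have h := foldl_inv cs 0 [] inv_init
  rw [List.nil_append] at h
  rcases h with ⟨h5, hinf⟩ | ⟨hle, hninf, _, _⟩
  · simp [h5, hinf]
  · constructor
    · intro h; omega
    · intro h; exact absurd h hninf

-- A's result, characterised --------------------------------------------------

lemma find_anton_eq (line : String) :
    find_anton line = PySem.Chars.isIn anton ((line.toList.filter pA).map PySem.Chars.lowerChar) := by
  unfold find_anton
  simp only [PySem.Str.toList_strip, PySem.Str.toList_replace]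
  rw [PySem.List.foldl_append_if (fun x => PySem.Chars.isIn [PySem.Chars.lowerChar x] "anton".toList)
    (fun x => PySem.Chars.lowerChar x)]
  rw [PySem.Chars.join_nil_singletons]
  have hsp : " ".toList = [' '] := by decide
  have hemp : "".toList = ([] : List Char) := by decide
  rw [hsp, hemp, replace_space]
  have hq : ∀ c, PySem.Chars.isspace c = true → pA c = false := isspace_pA_false
  rw [show (fun x => PySem.Chars.isIn [PySem.Chars.lowerChar x] "anton".toList) = pA from rfl]
  rw [filter_strip pA hq]
  rw [List.filter_filter]
  have hfeq : ∀ c : Char, (pA c && !(c == ' ')) = pA c := by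
    intro c
    by_cases hc : c = ' '
    · subst hc; simp [pA]; decide
    · simp [hc]
  simp only [hfeq]
  have hant : "anton".toList = anton := by decide
  rw [List.nil_append, hant]
  cases PySem.Chars.isIn anton ((line.toList.filter pA).map PySem.Chars.lowerChar) <;> simp

-- ===== VERDICT (by name: the statement is the Claim_ definition above) =====
theorem find_anton_spec : Claim_equal_find_anton := by
  intro line _
  unfold Spec_find_anton find_anton_alt
  rw [find_anton_eq]
  by_cases h : line.toList.foldl antonStep 0 = 5
  · have h1 : PySem.Chars.isIn anton ((line.toList.filter pA).map PySem.Chars.lowerChar) = true :=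
      (PySem.Chars.isIn_iff_infix _ _).mpr ((run_eq_iff _).mp h)
    rw [h1, h]
    simp
  · have h1 : PySem.Chars.isIn anton ((line.toList.filter pA).map PySem.Chars.lowerChar) = false :=
      (PySem.Chars.isIn_eq_false_iff _ _).mpr (fun hinf => h ((run_eq_iff _).mpr hinf))
    rw [h1]
    simp [h]
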